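-- pv_equiv track=rewrite | github.com/liv-yaa/Py_Code_Challenges | All_2019/PractceCodesignal.py | LU2electionsWinners
-- ===== SOURCE A (Python) =====
-- def LU2electionsWinners(votes, k):
--     votes_req = max(votes)
--     if not k:
--         front_runners = votes.count(votes_req)
--         if front_runners >= 2:
--             return 0
--         return 1
--     return sum(1 for v in votes if v+k > votes_req)
-- ===== SOURCE B (Python) =====
-- def LU2electionsWinners(votes, k):
--     votes_req = max(votes)
--     s = sorted(votes, reverse=True)
--     if not k:
--         return 0 if len(s) >= 2 and s[1] == votes_req else 1
--     t = votes_req - k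
--     count = 0
--     for v in s:
--         if v > t:
--             count += 1
--         else:
--             break
--     return count
-- ===== Notes on version B (the rewrite author's own statement) =====
-- stated objective: alternative
-- what changed: B sorts the votes descending once and then answers by inspecting the sorted order (second element for the k==0 tie test, length of the strict prefix above max-k for k!=0), replacing A's count()/generator-sum scans over the unsorted list.
import Mathlib
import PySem

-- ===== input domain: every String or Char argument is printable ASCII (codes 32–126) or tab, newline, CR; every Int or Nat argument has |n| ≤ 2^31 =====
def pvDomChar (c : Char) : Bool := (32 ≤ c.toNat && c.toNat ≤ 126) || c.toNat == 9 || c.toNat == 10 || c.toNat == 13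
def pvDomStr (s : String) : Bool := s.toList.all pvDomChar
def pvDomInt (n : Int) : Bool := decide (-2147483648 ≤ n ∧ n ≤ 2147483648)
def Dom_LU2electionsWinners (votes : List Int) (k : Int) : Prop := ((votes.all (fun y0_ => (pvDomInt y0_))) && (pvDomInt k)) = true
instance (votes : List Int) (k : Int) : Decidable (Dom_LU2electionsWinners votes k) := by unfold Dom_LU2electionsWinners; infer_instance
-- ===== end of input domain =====

-- B sorts the votes descending once and answers from the sorted order instead of A's
-- count()/generator-sum scans; return values are proved equal on nonempty vote lists.

-- ===== PORT A =====
def LU2electionsWinners (votes : List Int) (k : Int) : Int :=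
  match PySem.List.max? votes (fun v => v) with
  | none => 0   -- unreachable under Pre_ (max([]) raises ValueError)
  | some votes_req =>
    if k == 0 then
      if 2 ≤ PySem.List.count votes votes_req then 0 else 1
    else
      votes.foldl (fun acc v => if v + k > votes_req then acc + 1 else acc) 0

-- ===== PORT B =====
-- the 'for v in s: if v > t: count += 1 else: break' loop of Source B
def pvCountPrefix (t : Int) : List Int → Int
  | [] => 0
  | v :: rest => if v > t then 1 + pvCountPrefix t rest else 0

def LU2electionsWinners_alt (votes : List Int) (k : Int) : Int :=
  match PySem.List.max? votes (fun v => v) with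
  | none => 0   -- unreachable under Pre_ (max([]) raises ValueError)
  | some votes_req =>
    let s := PySem.List.sorted votes (fun v => v) true
    if k == 0 then
      if s[1]? = some votes_req then 0 else 1    -- len(s) >= 2 and s[1] == votes_req
    else
      pvCountPrefix (votes_req - k) s

-- ===== PRECONDITION & SPEC =====
-- Pre_ excludes only the empty list, on which max(votes) raises ValueError in both A and B.
def Pre_LU2electionsWinners (votes : List Int) (k : Int) : Prop := votes ≠ []
instance (votes : List Int) (k : Int) : Decidable (Pre_LU2electionsWinners votes k) := by
  unfold Pre_LU2electionsWinners; infer_instance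
def pvWitness_LU2electionsWinners : List Int × Int := ([3, 1, 3], 2)

def Spec_LU2electionsWinners (votes : List Int) (k : Int) (out : Int) : Prop := out = LU2electionsWinners_alt votes k
instance (votes : List Int) (k : Int) (out : Int) : Decidable (Spec_LU2electionsWinners votes k out) := by unfold Spec_LU2electionsWinners; infer_instance

-- ===== CLAIM (what is proved, stated in full; the proofs are below) =====
def Claim_equal_LU2electionsWinners : Prop := ∀ (votes : List Int) (k : Int), Dom_LU2electionsWinners votes k → Pre_LU2electionsWinners votes k → Spec_LU2electionsWinners votes k (LU2electionsWinners votes k)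

-- ===== LEMMAS AND PROOFS =====

-- On a descending list, the prefix loop counts exactly the elements above t.
theorem pvCountPrefix_eq_countP (t : Int) (s : List Int)
    (hs : s.Pairwise (fun a b => b ≤ a)) :
    pvCountPrefix t s = (s.countP (fun v => decide (t < v)) : Int) := by
  induction s with
  | nil => simp [pvCountPrefix]
  | cons v rest ih =>
    rcases List.pairwise_cons.mp hs with ⟨hall, hrest⟩
    by_cases hv : t < v
    · simp [pvCountPrefix, hv, ih hrest]
      omega
    · have hzero : rest.countP (fun v => decide (t < v)) = 0 := by
        rw [List.countP_eq_zero]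
        intro y hy
        have := hall y hy
        simp only [decide_eq_true_eq]
        omega
      simp [pvCountPrefix, hv, hzero]

theorem pv_head_sorted_rev_eq_max (votes : List Int) (m a : Int) (rest : List Int)
    (hmax : PySem.List.max? votes (fun v => v) = some m)
    (hs : PySem.List.sorted votes (fun v => v) true = a :: rest) : a = m := by
  have hperm : (PySem.List.sorted votes (fun v => v) true).Perm votes := PySem.List.sorted_perm ..
  have ham : a ∈ votes := hperm.mem_iff.mp (by simp [hs])
  have hle : a ≤ m := PySem.List.max?_isMax hmax a ham
  have hmem : m ∈ votes := PySem.List.max?_mem hmax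
  have hge : m ≤ a := PySem.List.key_head_sorted_rev_ge votes (fun v => v) hs m hmem
  omega

-- ===== VERDICT (by name: the statement is the Claim_ definition above) =====
theorem LU2electionsWinners_spec : Claim_equal_LU2electionsWinners := by
  intro votes k _hdom hpre
  unfold Spec_LU2electionsWinners LU2electionsWinners LU2electionsWinners_alt
  obtain ⟨m, hmax⟩ : ∃ m, PySem.List.max? votes (fun v => v) = some m := by
    cases h : PySem.List.max? votes (fun v => v) with
    | none => exact absurd ((PySem.List.max?_eq_none_iff votes (fun v => v)).mp h) hpre
    | some m => exact ⟨m, rfl⟩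
  rw [hmax]; dsimp only
  have hperm : (PySem.List.sorted votes (fun v => v) true).Perm votes := PySem.List.sorted_perm ..
  have hpair : (PySem.List.sorted votes (fun v => v) true).Pairwise (fun a b => b ≤ a) :=
    PySem.List.sorted_pairwise_rev ..
  by_cases hk : k == 0
  · simp only [hk, if_true]
    -- head of the descending sort is m; second element is m iff m occurs at least twice
    cases hs : PySem.List.sorted votes (fun v => v) true with
    | nil =>
      exact absurd ((PySem.List.sorted_eq_nil_iff votes (fun v => v) true).mp hs) hpre
    | cons a rest =>
      have ha : a = m := pv_head_sorted_rev_eq_max votes m a rest hmax hs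
      subst ha
      have hcount : votes.count a = (a :: rest).count a := by
        rw [hs] at hperm; exact (hperm.count_eq a).symm
      have hrpair : rest.Pairwise (fun x y => y ≤ x) := by
        rw [hs] at hpair; exact (List.pairwise_cons.mp hpair).2
      have hrall : ∀ y ∈ rest, y ≤ a := by
        rw [hs] at hpair
        exact fun y hy => (List.pairwise_cons.mp hpair).1 y hy
      have hiff : (a :: rest)[1]? = some a ↔ 2 ≤ votes.count a := by
        rw [hcount]
        cases rest with
        | nil => simp
        | cons b rb =>
          have h1 : (a :: b :: rb)[1]? = some b := rfl
          rw [h1, List.count_cons_self]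
          constructor
          · intro h
            have hb : b = a := by injection h
            subst hb
            rw [List.count_cons_self]
            omega
          · intro h
            have hb2 : a ∈ b :: rb := by
              rcases Nat.eq_zero_or_pos (List.count a (b :: rb)) with h0 | h0
              · omega
              · exact List.count_pos_iff.mp h0
            have hble : b ≤ a := hrall b (by simp)
            have hage : a ≤ b := by
              rcases List.mem_cons.mp hb2 with h2 | h2
              · omega
              · have := (List.pairwise_cons.mp hrpair).1 a h2
                omega
            have : b = a := by omega
            rw [this]
      by_cases h2 : (a :: rest)[1]? = some a
      · rw [PySem.List.count_eq, if_pos (hiff.mp h2), if_pos h2]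
      · rw [PySem.List.count_eq, if_neg (fun hc => h2 (hiff.mpr hc)), if_neg h2]
  · rw [if_neg hk, if_neg hk]
    rw [show (fun (acc : Int) v => if v + k > m then acc + 1 else acc) = (fun acc v => if (decide (m < v + k)) = true then acc + 1 else acc) by funext acc v; simp,
        PySem.List.foldl_if_add_one, pvCountPrefix_eq_countP _ _ hpair, hperm.countP_eq]
    simp only [Int.zero_add]
    congr 1
    apply List.countP_congr
    intro v _
    constructor <;> (intro h; simp_all; omega)
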